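-- pv_equiv track=rewrite | github.com/stefanutti/maps-coloring-python | backup/4ct.07-07-2016.py | check_if_one_edge_connected
-- ===== SOURCE A (Python) =====
-- def rotate(l, n):
--     return l[n:] + l[:n]
--
-- def check_if_one_edge_connected(face):
--
--     # Return variable
--     #
--     is_one_edge_connected_graph = False
--
--     # This is true only for faces != F2
--     # NOTE: F2 faces have this representation: [(v1, v2), (v2, v1)] that is correct
--     #
--     if len(face) != 2:
--
--         # Search the list [(),(),...,()]
--         #
--         i_edge = 0
--         while is_one_edge_connected_graph is False and i_edge < len(face):
--             reverse_edge = rotate(face[i_edge], 1)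
--
--             # Start the search
--             #
--             if reverse_edge in face[i_edge + 1:]:
--                 is_one_edge_connected_graph = True
--             else:
--
--                 # Move to the next edge
--                 #
--                 i_edge += 1
--
--     # Return
--     #
--     return is_one_edge_connected_graph
-- ===== SOURCE B (Python) =====
-- def check_if_one_edge_connected(face):
--     # Two staged passes instead of repeated suffix scans: record the first and
--     # last occurrence index of every edge, then check each distinct edge t:
--     # rotate(t, 1) occurs somewhere after t's first occurrence exactly when
--     # last[rotate(t, 1)] > first[t] (a self-rotating edge is covered too,
--     # since first < last iff it occurs twice).
--     if len(face) == 2: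
--         return False
--     first = {}
--     last = {}
--     for i, edge in enumerate(face):
--         t = tuple(edge)
--         first.setdefault(t, i)
--         last[t] = i
--     return any(last.get(t[1:] + t[:1], -1) > first[t] for t in first)
-- ===== Notes on version B (the rewrite author's own statement) =====
-- stated objective: alternative
-- what changed: Replaces A's per-edge scan of the remaining suffix with two staged passes: one pass records each edge's first and last occurrence index in two dicts, then a scan over the distinct edges tests last[rotate(t)] > first[t].
import Mathlib
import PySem

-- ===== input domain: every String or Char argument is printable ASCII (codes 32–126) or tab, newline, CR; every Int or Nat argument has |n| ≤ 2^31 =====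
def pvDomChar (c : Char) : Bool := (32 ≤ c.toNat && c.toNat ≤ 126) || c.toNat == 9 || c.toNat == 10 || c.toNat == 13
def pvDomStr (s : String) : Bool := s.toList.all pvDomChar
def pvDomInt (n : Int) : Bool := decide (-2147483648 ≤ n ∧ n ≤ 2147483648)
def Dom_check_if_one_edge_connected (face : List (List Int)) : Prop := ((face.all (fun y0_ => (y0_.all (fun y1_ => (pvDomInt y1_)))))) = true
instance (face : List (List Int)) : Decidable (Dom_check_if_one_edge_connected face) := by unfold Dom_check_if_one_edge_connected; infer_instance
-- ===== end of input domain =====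

-- B replaces A's repeated suffix scans with two staged passes: one pass records each
-- edge's first and last occurrence index in two dicts, then a scan over the distinct
-- edges tests last[rotate(t)] > first[t] (a different algorithm of similar cost).


-- ===== PORT A =====
-- rotate(l, n) = l[n:] + l[:n]
def pyRotate (l : List Int) (n : Int) : List Int :=
  PySem.List.slice l (some n) none ++ PySem.List.slice l none (some n)

-- the while loop: at position i it tests rotate(face[i],1) ∈ face[i+1:], else i += 1
def aWhile : List (List Int) → Bool
  | [] => false
  | e :: rest => if (pyRotate e 1) ∈ rest then true else aWhile rest

def check_if_one_edge_connected (face : List (List Int)) : Bool :=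
  if face.length ≠ 2 then aWhile face else false

-- ===== PORT B =====
-- t[1:] + t[:1]
def bRot (t : List Int) : List Int :=
  PySem.List.slice t (some 1) none ++ PySem.List.slice t none (some 1)

-- the for loop over enumerate(face): first.setdefault(t, i); last[t] = i
def bBuild (face : List (List Int)) :
    PySem.Dict (List Int) Int × PySem.Dict (List Int) Int :=
  (PySem.List.enumerate face 0).foldl
    (fun fl p => (fl.1.setdefault p.2 p.1, fl.2.insert p.2 p.1))
    (PySem.Dict.empty, PySem.Dict.empty)

def check_if_one_edge_connected_alt (face : List (List Int)) : Bool :=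
  if face.length = 2 then false
  else
    let fl := bBuild face
    -- any(last.get(rot t, -1) > first[t] for t in first); t is a key of first,
    -- so Python's first[t] is the total lookup getD (its default is never used)
    (fl.1.keys).any (fun t => fl.2.getD (bRot t) (-1) > fl.1.getD t (-1))

-- ===== PRECONDITION & SPEC =====
def Spec_check_if_one_edge_connected (face : List (List Int)) (out : Bool) : Prop := out = check_if_one_edge_connected_alt face
instance (face : List (List Int)) (out : Bool) : Decidable (Spec_check_if_one_edge_connected face out) := by unfold Spec_check_if_one_edge_connected; infer_instance

-- ===== CLAIM (what is proved, stated in full; the proofs are below) =====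
def Claim_equal_check_if_one_edge_connected : Prop := ∀ (face : List (List Int)), Dom_check_if_one_edge_connected face → Spec_check_if_one_edge_connected face (check_if_one_edge_connected face)

-- ===== LEMMAS AND PROOFS =====


-- ===== LEMMAS AND PROOFS =====

-- pyRotate with n = 1 is Source B's inline slice expression
theorem bRot_eq (t : List Int) : pyRotate t 1 = bRot t := rfl

-- last occurrence index of t in a list (proof-side helper)
def lastIdx? : List (List Int) → List Int → Option Nat
  | [], _ => none
  | x :: xs, t =>
      match lastIdx? xs t with
      | some k => some (k + 1)
      | none => if x = t then some 0 else none

theorem lastIdx?_spec {face : List (List Int)} {t : List Int} {k : Nat}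
    (h : lastIdx? face t = some k) : ∃ hk : k < face.length, face[k] = t := by
  induction face generalizing k with
  | nil => simp [lastIdx?] at h
  | cons x xs ih =>
    simp only [lastIdx?] at h
    cases hx : lastIdx? xs t with
    | some m =>
      rw [hx] at h
      obtain ⟨hm, hm'⟩ := ih hx
      cases h
      exact ⟨by simpa using Nat.succ_lt_succ hm, by simpa using hm'⟩
    | none =>
      rw [hx] at h
      split_ifs at h with hxt
      · cases h; exact ⟨by simp, by simpa using hxt⟩

theorem lastIdx?_ge {face : List (List Int)} {t : List Int} {j : Nat}
    (hj : j < face.length) (h : face[j] = t) :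
    ∃ k, lastIdx? face t = some k ∧ j ≤ k := by
  induction face generalizing j with
  | nil => simp at hj
  | cons x xs ih =>
    cases j with
    | zero =>
      simp only [List.getElem_cons_zero] at h
      cases hx : lastIdx? xs t with
      | some m => exact ⟨m + 1, by simp [lastIdx?, hx], by omega⟩
      | none => exact ⟨0, by simp [lastIdx?, hx, h], le_refl _⟩
    | succ j' =>
      have hj' : j' < xs.length := by simpa using hj
      have h' : xs[j'] = t := by simpa using h
      obtain ⟨m, hm, hle⟩ := ih hj' h'
      exact ⟨m + 1, by simp [lastIdx?, hm], by omega⟩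

-- first index is ≤ any occurrence
theorem index?_le {face : List (List Int)} {t : List Int} {k j : Nat}
    (hk : PySem.List.index? face t = some k) (hj : j < face.length)
    (h : face[j] = t) : k ≤ j := by
  obtain ⟨hklen, _, hmin⟩ := PySem.List.getElem_of_index?_eq_some hk
  by_contra hlt
  exact hmin j (by omega) h

-- find? over enumerate picks out the first index
theorem find?_enumerate (face : List (List Int)) (s : Int) (t : List Int) :
    (PySem.List.enumerate face s).find? (fun p => p.2 == t)
      = (PySem.List.index? face t).map (fun k => ((s + (k : Int)), t)) := by
  induction face generalizing s with
  | nil => simp [PySem.List.enumerate_nil]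
  | cons x xs ih =>
    rw [PySem.List.enumerate_cons, List.find?_cons]
    by_cases hx : x = t
    · subst hx
      rw [PySem.List.index?_cons_self]
      simp
    · have hbe : ((s, x).2 == t) = false := by simpa using hx
      rw [hbe, PySem.List.index?_cons_of_ne xs hx, ih (s + 1)]
      cases hidx : PySem.List.index? xs t with
      | none => simp
      | some k =>
        simp [Prod.ext_iff]
        ring

-- reversed find? over enumerate picks out the last index
theorem rfind?_enumerate (face : List (List Int)) (s : Int) (t : List Int) :
    (PySem.List.enumerate face s).reverse.find? (fun p => p.2 == t)
      = (lastIdx? face t).map (fun k => ((s + (k : Int)), t)) := by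
  induction face generalizing s with
  | nil => simp [PySem.List.enumerate_nil, lastIdx?]
  | cons x xs ih =>
    rw [PySem.List.enumerate_cons]
    simp only [List.reverse_cons, List.find?_append, ih (s + 1), lastIdx?]
    cases hidx : lastIdx? xs t with
    | some k =>
      simp [Prod.ext_iff]
      ring
    | none =>
      by_cases hx : x = t
      · subst hx
        simp
      · have hbe : ((s, x).2 == t) = false := by simpa using hx
        simp [hbe, hx]

-- the invariant of Source B's single building loop
theorem loop_get (xs : List (Int × List Int)) :
    ∀ (f l : PySem.Dict (List Int) Int) (t : List Int),
      ((xs.foldl (fun fl p => (fl.1.setdefault p.2 p.1, fl.2.insert p.2 p.1)) (f, l)).1.get? t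
        = (match f.get? t with
           | some v => some v
           | none => (xs.find? (fun p => p.2 == t)).map (·.1)))
      ∧ ((xs.foldl (fun fl p => (fl.1.setdefault p.2 p.1, fl.2.insert p.2 p.1)) (f, l)).2.get? t
        = (match xs.reverse.find? (fun p => p.2 == t) with
           | some p => some p.1
           | none => l.get? t)) := by
  induction xs with
  | nil => intro f l t; refine ⟨by simp; cases f.get? t <;> simp, by simp⟩
  | cons p xs ih =>
    intro f l t
    obtain ⟨i, u⟩ := p
    simp only [List.foldl_cons]
    obtain ⟨ih1, ih2⟩ := ih (f.setdefault u i) (l.insert u i) t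
    constructor
    · rw [ih1]
      by_cases htu : t = u
      · subst htu
        rw [PySem.Dict.get?_setdefault_self]
        cases hf : f.get? t with
        | some v => simp
        | none => simp
      · have hset : (f.setdefault u i).get? t = f.get? t := by
          by_cases hc : f.contains u = true
          · rw [PySem.Dict.setdefault_of_contains _ _ hc]
          · rw [PySem.Dict.setdefault_of_not_contains _ _ (by simpa using hc)]
            exact PySem.Dict.get?_insert_of_ne _ _ htu
        rw [hset]
        have hbe : ((i, u).2 == t) = false := by simp [Ne.symm htu]
        simp [hbe]
    · rw [ih2]
      simp only [List.reverse_cons, List.find?_append]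
      cases hr : xs.reverse.find? (fun p => p.2 == t) with
      | some q => simp
      | none =>
        by_cases htu : t = u
        · subst htu
          simp [PySem.Dict.get?_insert_self]
        · have hbe : ((i, u).2 == t) = false := by simp [Ne.symm htu]
          simp [hbe, PySem.Dict.get?_insert_of_ne _ _ htu]

theorem bBuild_first (face : List (List Int)) (t : List Int) :
    (bBuild face).1.get? t = (PySem.List.index? face t).map (fun k => (k : Int)) := by
  unfold bBuild
  rw [(loop_get _ _ _ _).1]
  rw [PySem.Dict.get?_empty, find?_enumerate]
  cases PySem.List.index? face t <;> simp

theorem bBuild_last (face : List (List Int)) (t : List Int) :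
    (bBuild face).2.get? t = (lastIdx? face t).map (fun k => (k : Int)) := by
  unfold bBuild
  rw [(loop_get _ _ _ _).2]
  rw [rfind?_enumerate]
  cases lastIdx? face t <;> simp [PySem.Dict.get?_empty]

-- the common characterisation: some edge's rotation occurs strictly later
def HasLaterRot (face : List (List Int)) : Prop :=
  ∃ (i j : Nat) (hi : i < face.length) (hj : j < face.length),
    i < j ∧ face[j] = pyRotate face[i] 1

theorem aWhile_iff (face : List (List Int)) : aWhile face = true ↔ HasLaterRot face := by
  induction face with
  | nil => simp [aWhile, HasLaterRot]
  | cons e rest ih =>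
    unfold HasLaterRot at *
    constructor
    · intro h
      by_cases hm : pyRotate e 1 ∈ rest
      · obtain ⟨j', hj', hje⟩ := List.getElem_of_mem hm
        exact ⟨0, j' + 1, by simp, by simpa using Nat.succ_lt_succ hj',
          by omega, by simpa using hje⟩
      · have h' : aWhile rest = true := by simpa [aWhile, hm] using h
        obtain ⟨i, j, hi, hj, hij, he⟩ := ih.mp h'
        exact ⟨i + 1, j + 1, by simpa using Nat.succ_lt_succ hi,
          by simpa using Nat.succ_lt_succ hj, by omega, by simpa using he⟩
    · rintro ⟨i, j, hi, hj, hij, he⟩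
      cases i with
      | zero =>
        obtain ⟨j', rfl⟩ : ∃ j', j = j' + 1 := ⟨j - 1, by omega⟩
        have hj' : j' < rest.length := by simpa using hj
        have : pyRotate e 1 ∈ rest := by
          rw [← show rest[j'] = pyRotate e 1 from by simpa using he]
          exact List.getElem_mem hj'
        simp [aWhile, this]
      | succ i' =>
        obtain ⟨j', rfl⟩ : ∃ j', j = j' + 1 := ⟨j - 1, by omega⟩
        have : aWhile rest = true := ih.mpr
          ⟨i', j', by simpa using hi, by simpa using hj, by omega, by simpa using he⟩
        simp [aWhile, this]

theorem bAny_iff (face : List (List Int)) :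
    ((bBuild face).1.keys).any
        (fun t => (bBuild face).2.getD (bRot t) (-1) > (bBuild face).1.getD t (-1)) = true
      ↔ HasLaterRot face := by
  rw [List.any_eq_true]
  constructor
  · rintro ⟨t, hmem, hgt⟩
    have hget : (bBuild face).1.get? t ≠ none := by
      intro hnone
      exact ((PySem.Dict.get?_eq_none_iff_not_mem_keys _ _).mp hnone) hmem
    rw [bBuild_first] at hget
    cases hidx : PySem.List.index? face t with
    | none => rw [hidx] at hget; simp at hget
    | some k =>
      have hfirstD : (bBuild face).1.getD t (-1) = (k : Int) := by
        rw [PySem.Dict.getD_eq_get?_getD, bBuild_first, hidx]; rfl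
      rw [hfirstD] at hgt
      cases hlast : lastIdx? face (bRot t) with
      | none =>
        have : (bBuild face).2.getD (bRot t) (-1) = -1 := by
          rw [PySem.Dict.getD_eq_get?_getD, bBuild_last, hlast]; rfl
        rw [this] at hgt
        simp at hgt
        omega
      | some m =>
        have hlastD : (bBuild face).2.getD (bRot t) (-1) = (m : Int) := by
          rw [PySem.Dict.getD_eq_get?_getD, bBuild_last, hlast]; rfl
        rw [hlastD] at hgt
        have hkm : k < m := by
          have := of_decide_eq_true hgt
          exact_mod_cast this
        obtain ⟨hklen, hkt, _⟩ := PySem.List.getElem_of_index?_eq_some hidx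
        obtain ⟨hmlen, hmt⟩ := lastIdx?_spec hlast
        exact ⟨k, m, hklen, hmlen, hkm, by rw [hmt, hkt, bRot_eq]⟩
  · rintro ⟨i, j, hi, hj, hij, he⟩
    have hmemt : face[i] ∈ face := List.getElem_mem hi
    have hidx : ∃ k, PySem.List.index? face face[i] = some k := by
      have := (PySem.List.index?_isSome_iff (xs := face) (v := face[i])).mpr hmemt
      exact Option.isSome_iff_exists.mp this
    obtain ⟨k, hk⟩ := hidx
    have hki : k ≤ i := index?_le hk hi rfl
    obtain ⟨m, hm, hjm⟩ := lastIdx?_ge hj (show face[j] = bRot face[i] from by rw [he, bRot_eq])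
    refine ⟨face[i], ?_, ?_⟩
    · rw [← PySem.Dict.contains_iff_mem_keys]
      rw [PySem.Dict.contains_eq_isSome_get?, bBuild_first, hk]
      rfl
    · have h1 : (bBuild face).1.getD face[i] (-1) = (k : Int) := by
        rw [PySem.Dict.getD_eq_get?_getD, bBuild_first, hk]; rfl
      have h2 : (bBuild face).2.getD (bRot face[i]) (-1) = (m : Int) := by
        rw [PySem.Dict.getD_eq_get?_getD, bBuild_last, hm]; rfl
      rw [h1, h2]
      have : (k : Int) < (m : Int) := by exact_mod_cast (by omega : k < m)
      simpa using this

-- ===== VERDICT (by name: the statement is the Claim_ definition above) =====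
theorem check_if_one_edge_connected_spec : Claim_equal_check_if_one_edge_connected := by
  intro face _
  unfold Spec_check_if_one_edge_connected check_if_one_edge_connected check_if_one_edge_connected_alt
  by_cases h : face.length = 2
  · simp [h]
  · rw [if_pos h, if_neg h]
    rw [Bool.eq_iff_iff, aWhile_iff]
    exact (bAny_iff face).symm
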